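-- pv_equiv track=rewrite | github.com/DmitriiUlianov/Codewars | 6 kyu kata/Simple Simple Simple String Expansion.py | string_expansion
-- ===== SOURCE A (Python) =====
-- def string_expansion(s):
--     l = len(s)
--     res = ''
--     idx = 0
--     while idx < l:
--         if s[idx].isalpha():
--             res += s[idx]
--             idx += 1
--         elif s[idx].isdigit():
--             num = int(s[idx])
--             idx += 1
--             while idx < l and s[idx].isalpha():
--                 res += num*s[idx]
--                 idx += 1
--     return res
-- ===== SOURCE B (Python) =====
-- def string_expansion(s):
--     res = ''
--     mult = 1
--     for c in s:
--         if c.isalpha():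
--             res += mult * c
--         elif c.isdigit():
--             mult = int(c)
--     return res
-- ===== Notes on version B (the rewrite author's own statement) =====
-- stated objective: simpler
-- what changed: Replaces A's index-based outer loop with nested inner while-loop by one flat for-loop state machine carrying a single persistent multiplier (initialised to 1).
-- outside the precondition, e.g. on string_expansion('a b'): A does not finish within the time limit, B returns 'ab'
import Mathlib
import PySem

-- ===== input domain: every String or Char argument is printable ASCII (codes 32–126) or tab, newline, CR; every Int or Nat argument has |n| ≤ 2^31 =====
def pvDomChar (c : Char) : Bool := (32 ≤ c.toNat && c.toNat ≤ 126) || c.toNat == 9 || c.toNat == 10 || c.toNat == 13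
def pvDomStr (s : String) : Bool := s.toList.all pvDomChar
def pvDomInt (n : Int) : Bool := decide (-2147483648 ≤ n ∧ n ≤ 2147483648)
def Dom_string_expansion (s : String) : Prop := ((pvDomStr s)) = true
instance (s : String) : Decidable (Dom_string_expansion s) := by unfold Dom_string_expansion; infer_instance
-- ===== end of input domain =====

-- B flattens A's nested index loops into one pass with a persistent multiplier (objective: simpler).

-- ===== PORT A =====
-- A walks the string by index: outer loop appends letters once; on a digit it enters an
-- inner while-loop appending num copies of each following letter.  We port the index walk
-- as mutual structural recursion on the remaining character list; when the inner loop stops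
-- at a char, the outer loop re-examines that same char, which is inlined here (the char is
-- not alpha at that point, so only the digit/other branches of the outer loop are replayed).
-- On a char that is neither letter nor digit Python's loop never advances (diverges); those
-- inputs are outside Pre_ and the port skips the char there.
mutual
def pvOuterA : List Char → String → String
  | [], res => res
  | c :: rest, res =>
    if c.isAlpha then pvOuterA rest (res.push c)
    else if c.isDigit then pvInnerA (c.toNat - 48) rest res
    else pvOuterA rest res
def pvInnerA (num : Nat) : List Char → String → String
  | [], res => res
  | c :: rest, res =>
    if c.isAlpha then pvInnerA num rest (res ++ String.ofList (List.replicate num c))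
    else if c.isDigit then pvInnerA (c.toNat - 48) rest res
    else pvOuterA rest res
end

def string_expansion (s : String) : String := pvOuterA s.toList ""

-- ===== PORT B =====
-- one flat pass: (mult, res) state, mult starts at 1
def pvStepB (acc : Nat × String) (c : Char) : Nat × String :=
  if c.isAlpha then (acc.1, acc.2 ++ String.ofList (List.replicate acc.1 c))
  else if c.isDigit then (c.toNat - 48, acc.2)
  else acc

def string_expansion_alt (s : String) : String := (s.toList.foldl pvStepB (1, "")).2

-- ===== PRECONDITION & SPEC =====
-- Pre_ excludes strings containing a character that is neither a letter nor a digit: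
-- on those Python A's while-loop never advances the index and A diverges (never returns).
def Pre_string_expansion (s : String) : Prop := s.toList.all (fun c => c.isAlpha || c.isDigit) = true
instance (s : String) : Decidable (Pre_string_expansion s) := by unfold Pre_string_expansion; infer_instance
def pvWitness_string_expansion : String := "a2bc0d"

def Spec_string_expansion (s : String) (out : String) : Prop := out = string_expansion_alt s
instance (s : String) (out : String) : Decidable (Spec_string_expansion s out) := by unfold Spec_string_expansion; infer_instance

-- ===== CLAIM (what is proved, stated in full; the proofs are below) =====
def Claim_equal_string_expansion : Prop := ∀ (s : String), Dom_string_expansion s → Pre_string_expansion s → Spec_string_expansion s (string_expansion s)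

-- ===== LEMMAS AND PROOFS =====

theorem pvInnerA_eq (l : List Char) : ∀ (num : Nat) (res : String),
    (∀ c ∈ l, c.isAlpha ∨ c.isDigit) → pvInnerA num l res = (l.foldl pvStepB (num, res)).2 := by
  induction l with
  | nil => intro num res _; simp [pvInnerA]
  | cons c rest ih =>
    intro num res h
    have hc := h c (by simp)
    rcases hc with hc | hc
    · simp [pvInnerA, pvStepB, hc, List.foldl]
      exact ih num _ (fun x hx => h x (by simp [hx]))
    · by_cases ha : c.isAlpha
      · simp [pvInnerA, pvStepB, ha, List.foldl]
        exact ih num _ (fun x hx => h x (by simp [hx]))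
      · simp [pvInnerA, pvStepB, ha, hc, List.foldl]
        exact ih _ _ (fun x hx => h x (by simp [hx]))

theorem pvOuterA_eq (l : List Char) : ∀ (res : String),
    (∀ c ∈ l, c.isAlpha ∨ c.isDigit) → pvOuterA l res = (l.foldl pvStepB (1, res)).2 := by
  induction l with
  | nil => intro res _; simp [pvOuterA]
  | cons c rest ih =>
    intro res h
    have hc := h c (by simp)
    by_cases ha : c.isAlpha
    · have hpush : res.push c = res ++ String.ofList (List.replicate 1 c) := rfl
      simp [pvOuterA, pvStepB, ha, List.foldl, hpush]
      exact ih _ (fun x hx => h x (by simp [hx]))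
    · rcases hc with hc | hc
      · exact absurd hc ha
      · simp [pvOuterA, pvStepB, ha, hc, List.foldl]
        exact pvInnerA_eq rest _ res (fun x hx => h x (by simp [hx]))

-- ===== VERDICT (by name: the statement is the Claim_ definition above) =====
theorem string_expansion_spec : Claim_equal_string_expansion := by
  intro s _ hpre
  unfold Spec_string_expansion string_expansion string_expansion_alt
  have h : ∀ c ∈ s.toList, c.isAlpha = true ∨ c.isDigit = true := by
    intro c hc
    have := List.all_eq_true.mp hpre c hc
    simpa using this
  exact pvOuterA_eq s.toList "" h
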